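-- pv_equiv track=rewrite | github.com/wgong/cs-faculty | app/app_poc.py | _move_sys_col_end
-- ===== SOURCE A (Python) =====
-- def _move_sys_col_end(cols, sys_cols=["id"]):
--     """move id, ts sys column to last position
--     """
--     new_sys_cols = []
--     new_cols = []
--     for c in cols:
--         if c in sys_cols:
--             new_sys_cols.append(c)
--         else:
--             new_cols.append(c)
--     if sys_cols:
--         if len(new_cols) == len(cols):
--             return new_cols
--         else:
--             return new_cols + new_sys_cols
--     else:
--         return cols
-- ===== SOURCE B (Python) =====
-- def _move_sys_col_end(cols, sys_cols=["id"]):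
--     """move id, ts sys column to last position"""
--     return sorted(cols, key=lambda c: c in sys_cols)
-- ===== Notes on version B (the rewrite author's own statement) =====
-- stated objective: idiomatic
-- what changed: Replaces the explicit two-accumulator partition loop and its three-way return branching with a single stable sort on the boolean key 'c in sys_cols', which keeps non-sys columns first and sys columns last, each in original order.
import Mathlib
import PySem

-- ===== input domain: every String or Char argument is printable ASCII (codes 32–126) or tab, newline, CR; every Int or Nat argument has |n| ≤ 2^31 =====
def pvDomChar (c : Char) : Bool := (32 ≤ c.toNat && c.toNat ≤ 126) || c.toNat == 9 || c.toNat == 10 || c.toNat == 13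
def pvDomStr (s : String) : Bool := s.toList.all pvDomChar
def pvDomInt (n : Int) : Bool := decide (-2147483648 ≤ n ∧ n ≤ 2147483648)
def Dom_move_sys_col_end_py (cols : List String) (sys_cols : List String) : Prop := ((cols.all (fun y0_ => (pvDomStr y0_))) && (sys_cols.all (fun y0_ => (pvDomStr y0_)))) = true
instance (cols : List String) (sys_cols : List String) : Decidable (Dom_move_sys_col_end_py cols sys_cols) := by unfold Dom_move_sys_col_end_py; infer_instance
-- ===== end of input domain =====

-- B replaces A's explicit two-accumulator partition loop and branching with one stable sort
-- on the boolean membership key (idiomatic; return value only, neither mutates its arguments).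

-- ===== PORT A =====
-- state = (new_sys_cols, new_cols); the for-loop appends c to one of them.
def move_sys_col_end_py (cols : List String) (sys_cols : List String) : List String :=
  let st := cols.foldl
    (fun (acc : List String × List String) c =>
      if c ∈ sys_cols then (acc.1 ++ [c], acc.2) else (acc.1, acc.2 ++ [c]))
    ([], [])
  if sys_cols ≠ [] then
    if st.2.length = cols.length then st.2 else st.2 ++ st.1
  else cols

-- ===== PORT B =====
-- sorted(cols, key=lambda c: c in sys_cols): Python compares the boolean keys by their
-- numeric value, ported exactly as the 0/1 Int indicator of membership.
def move_sys_col_end_py_alt (cols : List String) (sys_cols : List String) : List String :=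
  PySem.List.sorted cols (fun c => if c ∈ sys_cols then (1 : Int) else 0) false

-- ===== PRECONDITION & SPEC =====
def Spec_move_sys_col_end_py (cols : List String) (sys_cols : List String) (out : List String) : Prop := out = move_sys_col_end_py_alt cols sys_cols
instance (cols : List String) (sys_cols : List String) (out : List String) : Decidable (Spec_move_sys_col_end_py cols sys_cols out) := by unfold Spec_move_sys_col_end_py; infer_instance

-- ===== CLAIM (what is proved, stated in full; the proofs are below) =====
def Claim_equal_move_sys_col_end_py : Prop := ∀ (cols : List String) (sys_cols : List String), Dom_move_sys_col_end_py cols sys_cols → Spec_move_sys_col_end_py cols sys_cols (move_sys_col_end_py cols sys_cols)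

-- ===== LEMMAS AND PROOFS =====

-- Inserting x between a prefix it does not go before and a suffix it goes before.
theorem insertBy_split (before : String → String → Bool) (x : String) (zs os : List String)
    (hz : ∀ z ∈ zs, before x z = false) (ho : ∀ o ∈ os, before x o = true) :
    PySem.List.insertBy before x (zs ++ os) = zs ++ x :: os := by
  induction zs with
  | nil =>
    cases os with
    | nil => simp [PySem.List.insertBy]
    | cons o os' => simp [PySem.List.insertBy, ho o (by simp)]
  | cons z zs' ih =>
    have hz0 : before x z = false := hz z (by simp)
    simp only [List.cons_append, PySem.List.insertBy, hz0]
    simp [ih (fun z hz' => hz z (by simp [hz'])) ]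

-- Invariant of the insertion-sort foldl with a 0/1 key: the accumulator stays
-- (non-members so far) ++ (members so far).
theorem foldl_insertBy_partition (sys_cols : List String) (cols zs os : List String)
    (hz : ∀ z ∈ zs, z ∉ sys_cols) (ho : ∀ o ∈ os, o ∈ sys_cols) :
    cols.foldl
      (fun acc x => PySem.List.insertBy
        (fun a b => decide ((if a ∈ sys_cols then (1 : Int) else 0) < (if b ∈ sys_cols then (1 : Int) else 0))) x acc)
      (zs ++ os)
      = (zs ++ cols.filter (fun c => c ∉ sys_cols)) ++ (os ++ cols.filter (fun c => c ∈ sys_cols)) := by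
  induction cols generalizing zs os with
  | nil => simp
  | cons c cs ih =>
    by_cases hc : c ∈ sys_cols
    · have h1 : PySem.List.insertBy
          (fun a b => decide ((if a ∈ sys_cols then (1 : Int) else 0) < (if b ∈ sys_cols then (1 : Int) else 0))) c (zs ++ os)
          = zs ++ (os ++ [c]) := by
        rw [show zs ++ (os ++ [c]) = (zs ++ os) ++ [c] by simp]
        apply PySem.List.insertBy_of_forall_not_before
        intro y hy
        rcases List.mem_append.mp hy with h | h
        · simp [hc, hz y h]
        · simp [hc, ho y h]
      simp only [List.foldl_cons, h1]
      rw [ih zs (os ++ [c]) hz (by intro o hoo; rcases List.mem_append.mp hoo with h | h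
                                   · exact ho o h
                                   · simp at h; simpa [h] using hc)]
      simp [hc]
    · have h1 : PySem.List.insertBy
          (fun a b => decide ((if a ∈ sys_cols then (1 : Int) else 0) < (if b ∈ sys_cols then (1 : Int) else 0))) c (zs ++ os)
          = (zs ++ [c]) ++ os := by
        rw [show (zs ++ [c]) ++ os = zs ++ c :: os by simp]
        apply insertBy_split
        · intro z hzz; simp [hc, hz z hzz]
        · intro o hoo; simp [hc, ho o hoo]
      simp only [List.foldl_cons, h1]
      rw [ih (zs ++ [c]) os (by intro z hzz; rcases List.mem_append.mp hzz with h | h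
                                · exact hz z h
                                · simp at h; simpa [h] using hc) ho]
      simp [hc]

theorem alt_eq_partition (cols sys_cols : List String) :
    move_sys_col_end_py_alt cols sys_cols
      = cols.filter (fun c => c ∉ sys_cols) ++ cols.filter (fun c => c ∈ sys_cols) := by
  unfold move_sys_col_end_py_alt
  rw [PySem.List.sorted_eq_foldl_insertBy]
  simpa using foldl_insertBy_partition sys_cols cols [] [] (by simp) (by simp)

-- A's loop accumulator in terms of filters.
theorem a_foldl_eq (cols sys_cols : List String) :
    cols.foldl
      (fun (acc : List String × List String) c =>
        if c ∈ sys_cols then (acc.1 ++ [c], acc.2) else (acc.1, acc.2 ++ [c]))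
      ([], [])
      = (cols.filter (fun c => c ∈ sys_cols), cols.filter (fun c => c ∉ sys_cols)) := by
  have gen : ∀ (cs a b : List String),
      cs.foldl
        (fun (acc : List String × List String) c =>
          if c ∈ sys_cols then (acc.1 ++ [c], acc.2) else (acc.1, acc.2 ++ [c]))
        (a, b)
        = (a ++ cs.filter (fun c => c ∈ sys_cols), b ++ cs.filter (fun c => c ∉ sys_cols)) := by
    intro cs
    induction cs with
    | nil => simp
    | cons c cs' ih =>
      intro a b
      by_cases hc : c ∈ sys_cols <;> simp [hc, ih]
  simpa using gen cols [] []

-- ===== VERDICT (by name: the statement is the Claim_ definition above) =====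
theorem move_sys_col_end_py_spec : Claim_equal_move_sys_col_end_py := by
  intro cols sys_cols _
  unfold Spec_move_sys_col_end_py
  rw [alt_eq_partition]
  unfold move_sys_col_end_py
  rw [a_foldl_eq]
  by_cases hs : sys_cols = []
  · subst hs; simp
  · simp only [ne_eq, hs, not_false_iff, if_true]
    by_cases hl : (cols.filter (fun c => c ∉ sys_cols)).length = cols.length
    · have hall : ∀ c ∈ cols, c ∉ sys_cols := by
        simpa using (List.length_filter_eq_length_iff).mp hl
      have hnil : cols.filter (fun c => c ∈ sys_cols) = [] := by
        simp only [List.filter_eq_nil_iff]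
        intro c hc
        simp [hall c hc]
      simp [hnil]
    · simp
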